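-- pv_equiv track=rewrite | github.com/ana-m-m/mateos_mata_practices_20-21 | class_practice/Session-03/dna_count.py | counter_of_bases
-- ===== SOURCE A (Python) =====
-- def counter_of_bases(dna):
--     a, c, g, t = 0, 0, 0, 0
--     for i in dna:
--         if i == "A":
--             a += 1
--         elif i == "C":
--             c += 1
--         elif i == "G":
--             g += 1
--         else:
--             t += 1
--     return a, c, g, t
-- ===== SOURCE B (Python) =====
-- def counter_of_bases(dna):
--     a = dna.count("A")
--     c = dna.count("C")
--     g = dna.count("G")
--     return a, c, g, len(dna) - a - c - g
-- ===== Notes on version B (the rewrite author's own statement) =====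
-- stated objective: faster
-- what changed: Replaces the explicit per-character loop with four branches by three str.count library scans plus arithmetic (t = len - a - c - g), which preserves the original's else-catch-all counting of non-A/C/G characters as t.
import Mathlib
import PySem

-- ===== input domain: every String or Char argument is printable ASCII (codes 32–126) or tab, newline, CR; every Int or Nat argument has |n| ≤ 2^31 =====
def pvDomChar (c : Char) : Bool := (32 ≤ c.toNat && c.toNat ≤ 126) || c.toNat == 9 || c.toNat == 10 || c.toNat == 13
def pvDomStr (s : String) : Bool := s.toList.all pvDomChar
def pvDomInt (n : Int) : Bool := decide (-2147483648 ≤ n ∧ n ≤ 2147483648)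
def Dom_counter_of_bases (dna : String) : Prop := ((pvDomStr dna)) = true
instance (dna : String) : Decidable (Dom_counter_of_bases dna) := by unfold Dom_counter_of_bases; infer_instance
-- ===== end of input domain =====

-- B replaces A's explicit per-character loop and branch chain by three library substring counts plus arithmetic (t = len - a - c - g); objective: faster (library scans replace the interpreted loop; measured).


-- ===== PORT A =====
-- the loop body: one step per character, branches in A's order
def pvStepA (st : Int × Int × Int × Int) (i : Char) : Int × Int × Int × Int :=
  if i == 'A' then (st.1 + 1, st.2.1, st.2.2.1, st.2.2.2)
  else if i == 'C' then (st.1, st.2.1 + 1, st.2.2.1, st.2.2.2)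
  else if i == 'G' then (st.1, st.2.1, st.2.2.1 + 1, st.2.2.2)
  else (st.1, st.2.1, st.2.2.1, st.2.2.2 + 1)

def counter_of_bases (dna : String) : Int × Int × Int × Int :=
  dna.toList.foldl pvStepA (0, 0, 0, 0)

-- ===== PORT B =====
def counter_of_bases_alt (dna : String) : Int × Int × Int × Int :=
  let a : Int := PySem.Str.count dna "A"
  let c : Int := PySem.Str.count dna "C"
  let g : Int := PySem.Str.count dna "G"
  (a, c, g, PySem.Str.len dna - a - c - g)

-- ===== PRECONDITION & SPEC =====
def Spec_counter_of_bases (dna : String) (out : Int × Int × Int × Int) : Prop := out = counter_of_bases_alt dna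
instance (dna : String) (out : Int × Int × Int × Int) : Decidable (Spec_counter_of_bases dna out) := by unfold Spec_counter_of_bases; infer_instance

-- ===== CLAIM (what is proved, stated in full; the proofs are below) =====
def Claim_equal_counter_of_bases : Prop := ∀ (dna : String), Dom_counter_of_bases dna → Spec_counter_of_bases dna (counter_of_bases dna)

-- ===== LEMMAS AND PROOFS =====

-- Chars.count with a single-character needle is the element count
theorem countGo_singleton (ch : Char) :
    ∀ (l : List Char) (fuel acc : Nat), l.length ≤ fuel →
      PySem.Chars.count.go [ch] fuel l acc = acc + l.count ch := by
  intro l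
  induction l with
  | nil => intro fuel acc _; cases fuel <;> simp [PySem.Chars.count.go]
  | cons h t ih =>
    intro fuel acc hf
    cases fuel with
    | zero => simp at hf
    | succ f =>
      have hle : t.length ≤ f := by simp at hf; omega
      by_cases hch : ch = h
      · subst hch
        simp [PySem.Chars.count.go, List.isPrefixOf, ih f (acc + 1) hle]
        omega
      · have hb : (ch == h) = false := by simpa using hch
        have hb' : (h == ch) = false := by simpa using (Ne.symm hch)
        simp [PySem.Chars.count.go, List.isPrefixOf, hb, hb', ih f acc hle, List.count_cons]

theorem charsCount_singleton (ch : Char) (l : List Char) :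
    PySem.Chars.count l [ch] = l.count ch := by
  simp [PySem.Chars.count, countGo_singleton ch l l.length 0 l.length.le_refl]

-- A's loop computes the three counts and the catch-all remainder
theorem loopA_eq (l : List Char) :
    ∀ (a c g t : Int),
      l.foldl pvStepA (a, c, g, t) =
        (a + l.count 'A', c + l.count 'C', g + l.count 'G',
         t + ((l.length : Int) - l.count 'A' - l.count 'C' - l.count 'G')) := by
  induction l with
  | nil => intro a c g t; simp
  | cons h tl ih =>
    intro a c g t
    by_cases hA : h = 'A'
    · subst hA; simp [pvStepA, ih]; omega
    · by_cases hC : h = 'C'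
      · subst hC; simp [pvStepA, ih]; omega
      · by_cases hG : h = 'G'
        · subst hG; simp [pvStepA, ih]; omega
        · have hA' : (h == 'A') = false := by simpa using hA
          have hC' : (h == 'C') = false := by simpa using hC
          have hG' : (h == 'G') = false := by simpa using hG
          simp [pvStepA, hA', hC', hG', ih, List.count_cons]
          omega

-- ===== VERDICT (by name: the statement is the Claim_ definition above) =====
theorem counter_of_bases_spec : Claim_equal_counter_of_bases := by
  intro dna _
  unfold Spec_counter_of_bases counter_of_bases counter_of_bases_alt
  simp [PySem.Str.count_eq, loopA_eq, charsCount_singleton, PySem.Str.len]
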